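-- pv_equiv track=rewrite | github.com/yb173/atcoder-playground | abc/abc068/b/abc068_b.py | divideTimes
-- ===== SOURCE A (Python) =====
-- def divideTimes(n: int):
--     cnt = 0
--     while n > 0:
--         if not n % 2 == 0:
--             break
--         cnt += 1
--         n //= 2
--     return cnt
-- ===== SOURCE B (Python) =====
-- def divideTimes(n: int):
--     if n <= 0:
--         return 0
--     return (n & -n).bit_length() - 1
-- ===== Notes on version B (the rewrite author's own statement) =====
-- stated objective: idiomatic
-- what changed: Replaces the divide-by-two while loop and its counter with the closed-form bit expression (n & -n).bit_length() minus one, behind a single non-positive guard.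
import Mathlib
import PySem

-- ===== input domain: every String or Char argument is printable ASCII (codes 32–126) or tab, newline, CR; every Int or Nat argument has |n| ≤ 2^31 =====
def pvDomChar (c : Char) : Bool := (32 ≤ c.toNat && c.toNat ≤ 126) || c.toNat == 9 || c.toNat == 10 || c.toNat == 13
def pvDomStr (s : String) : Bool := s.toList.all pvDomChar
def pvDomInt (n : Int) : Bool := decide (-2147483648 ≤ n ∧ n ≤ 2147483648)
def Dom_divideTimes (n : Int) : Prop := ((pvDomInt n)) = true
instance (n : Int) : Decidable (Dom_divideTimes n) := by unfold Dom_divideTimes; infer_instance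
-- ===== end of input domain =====

-- B computes the trailing-zero count by the closed-form bit expression (n & -n).bit_length() - 1
-- behind a single `n <= 0` guard, instead of A's while loop that divides by 2 and counts.

-- ===== PORT A =====
-- the while loop of A: condition n > 0, break when n % 2 != 0, else cnt += 1; n //= 2
def divideTimesLoop (n cnt : Int) : Int :=
  if 0 < n then
    if PySem.Int.mod n 2 = 0 then
      divideTimesLoop (PySem.Int.floordiv n 2) (cnt + 1)
    else cnt
  else cnt
termination_by n.toNat
decreasing_by
  rw [PySem.Int.floordiv_eq_ediv_of_pos (by norm_num)]
  omega

def divideTimes (n : Int) : Int := divideTimesLoop n 0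

-- ===== PORT B =====
def divideTimes_alt (n : Int) : Int :=
  if n ≤ 0 then 0
  else (PySem.Int.bitLength (PySem.Int.band n (-n)) : Int) - 1

-- ===== PRECONDITION & SPEC =====
def Spec_divideTimes (n : Int) (out : Int) : Prop := out = divideTimes_alt n
instance (n : Int) (out : Int) : Decidable (Spec_divideTimes n out) := by unfold Spec_divideTimes; infer_instance

-- ===== CLAIM (what is proved, stated in full; the proofs are below) =====
def Claim_equal_divideTimes : Prop := ∀ (n : Int), Dom_divideTimes n → Spec_divideTimes n (divideTimes n)

-- ===== LEMMAS AND PROOFS =====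

-- (2k+1) & 2k = 2k : an odd number ANDed with its predecessor drops only the low bit
lemma pv_and_pred_odd (k : Nat) : (2 * k + 1) &&& (2 * k) = 2 * k := by
  apply Nat.eq_of_testBit_eq
  intro i
  cases i with
  | zero => simp [Nat.testBit_zero]
  | succ j =>
      rw [Nat.testBit_and]
      simp only [Nat.testBit_succ]
      have h1 : (2 * k + 1) / 2 = k := by omega
      have h2 : (2 * k) / 2 = k := by omega
      rw [h1, h2, Bool.and_self]

-- 2k & (2k-1) = 2 * (k & (k-1)) for k > 0
lemma pv_and_pred_even (k : Nat) (hk : 0 < k) :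
    (2 * k) &&& (2 * k - 1) = 2 * (k &&& (k - 1)) := by
  apply Nat.eq_of_testBit_eq
  intro i
  cases i with
  | zero =>
      simp [Nat.testBit_zero, Nat.mul_mod_right]
  | succ j =>
      rw [Nat.testBit_and]
      simp only [Nat.testBit_succ]
      have h1 : (2 * k) / 2 = k := by omega
      have h2 : (2 * k - 1) / 2 = k - 1 := by omega
      have h3 : (2 * (k &&& (k - 1))) / 2 = k &&& (k - 1) := by omega
      rw [h1, h2, h3, Nat.testBit_and]

-- the lowest set bit m - (m & (m-1)) is positive for m > 0
lemma pv_lowbit_pos (m : Nat) (hm : 0 < m) : 0 < m - (m &&& (m - 1)) := by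
  have := Nat.and_le_right (n := m) (m := m - 1)
  omega

-- the loop computes cnt + bit_length(lowest set bit of m) - 1 on positive inputs
lemma pv_loop_eq (m : Nat) (hm : 0 < m) :
    ∀ c : Int, divideTimesLoop (m : Int) c
      = c + (PySem.Int.bitLength ((m - (m &&& (m - 1)) : Nat) : Int) : Int) - 1 := by
  induction m using Nat.strong_induction_on with
  | _ m ih =>
    intro c
    rw [divideTimesLoop]
    have hpos : (0 : Int) < (m : Int) := by exact_mod_cast hm
    rw [if_pos hpos]
    rcases Nat.even_or_odd m with ⟨k, hk⟩ | ⟨k, hk⟩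
    · -- even case: m = 2k, k > 0
      have hk0 : 0 < k := by omega
      have hmod : PySem.Int.mod (m : Int) 2 = 0 := by
        rw [PySem.Int.mod_eq_zero_iff_dvd]
        exact ⟨(k : Int), by push_cast; omega⟩
      rw [if_pos hmod]
      have hdiv : PySem.Int.floordiv (m : Int) 2 = ((k : Nat) : Int) := by
        rw [PySem.Int.floordiv_eq_ediv_of_pos (by norm_num)]
        omega
      rw [hdiv, ih k (by omega) hk0 (c + 1)]
      have hK : m - (m &&& (m - 1)) = 2 * (k - (k &&& (k - 1))) := by
        have h2 : (2 * k) &&& (2 * k - 1) = 2 * (k &&& (k - 1)) := pv_and_pred_even k hk0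
        have hle : k &&& (k - 1) ≤ k - 1 := Nat.and_le_right
        subst hk
        rw [show k + k = 2 * k by ring] at *
        omega
      have hKk : 0 < k - (k &&& (k - 1)) := pv_lowbit_pos k hk0
      have hbl : PySem.Int.bitLength ((2 * (k - (k &&& (k - 1))) : Nat) : Int)
          = PySem.Int.bitLength ((k - (k &&& (k - 1)) : Nat) : Int) + 1 := by
        rw [PySem.Int.bitLength_natCast (by omega)]
        congr 2
        omega
      rw [hK, hbl]
      push_cast
      ring
    · -- odd case: m = 2k + 1, loop exits immediately
      have hmod : ¬ PySem.Int.mod (m : Int) 2 = 0 := by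
        rw [PySem.Int.mod_eq_zero_iff_dvd]
        rintro ⟨j, hj⟩
        omega
      rw [if_neg hmod]
      have hK : m - (m &&& (m - 1)) = 1 := by
        have h1 : (2 * k + 1) &&& (2 * k) = 2 * k := pv_and_pred_odd k
        have : m &&& (m - 1) = 2 * k := by
          have hm1 : m - 1 = 2 * k := by omega
          rw [hm1, show m = 2 * k + 1 by omega, h1]
        omega
      rw [hK]
      have : PySem.Int.bitLength ((1 : Nat) : Int) = 1 := by decide
      rw [this]
      ring

-- for n > 0, Python's n & -n equals the lowest set bit of n.toNat
lemma pv_band_neg (n : Int) (hn : 0 < n) :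
    PySem.Int.band n (-n) = ((n.toNat - (n.toNat &&& (n.toNat - 1)) : Nat) : Int) := by
  unfold PySem.Int.band
  rw [if_pos (by omega), if_neg (by omega)]
  have h1 : (-(-n) - 1).toNat = n.toNat - 1 := by omega
  rw [h1]

-- ===== VERDICT (by name: the statement is the Claim_ definition above) =====
theorem divideTimes_spec : Claim_equal_divideTimes := by
  intro n _
  unfold Spec_divideTimes divideTimes divideTimes_alt
  by_cases h : n ≤ 0
  · rw [divideTimesLoop, if_neg (by omega), if_pos h]
  · have hn : 0 < n := by omega
    have hm : 0 < n.toNat := by omega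
    rw [if_neg h, pv_band_neg n hn]
    have := pv_loop_eq n.toNat hm 0
    rw [show ((n.toNat : Nat) : Int) = n by omega] at this
    rw [this]
    ring
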